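-- pv_equiv track=rewrite | github.com/ChrisTheCoolHut/bcheck | bin_check/function_models.py | get_largest_symbolic_buffer
-- ===== SOURCE A (Python) =====
-- def get_largest_symbolic_buffer(symbolic_list):
--
--     """
--     Iterate over the characters in the string
--     Checking for where our symbolic values are
--     This helps in weird cases like:
--     char myVal[100] = "I\'m cool ";
--     strcat(myVal,STDIN);
--     printf(myVal);
--     """
--     position = 0
--     count = 0
--     greatest_count = 0
--     for i in range(1, len(symbolic_list)):
--         if symbolic_list[i] and symbolic_list[i] == symbolic_list[i - 1]:
--             count = count + 1
--             if count > greatest_count: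
--                 greatest_count = count
--                 position = i - count
--         else:
--             if count > greatest_count:
--                 greatest_count = count
--                 position = i - 1 - count
--                 # previous position minus greatest count
--             count = 0
--
--     return position, greatest_count
-- ===== SOURCE B (Python) =====
-- def get_largest_symbolic_buffer(symbolic_list):
--     # Two-phase rewrite: group the list into runs (value, start, length),
--     # then scan the runs for the first truthy run whose length-1 beats the best.
--     runs = []
--     cur_val = None
--     cur_start = 0
--     cur_len = 0
--     for idx, x in enumerate(symbolic_list):
--         if cur_len > 0 and x == cur_val:
--             cur_len += 1
--         else:
--             if cur_len > 0:
--                 runs.append((cur_val, cur_start, cur_len))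
--             cur_val, cur_start, cur_len = x, idx, 1
--     if cur_len > 0:
--         runs.append((cur_val, cur_start, cur_len))
--
--     best_pos, best_count = 0, 0
--     for value, start, length in runs:
--         if value and length - 1 > best_count:
--             best_pos, best_count = start, length - 1
--     return best_pos, best_count
-- ===== Notes on version B (the rewrite author's own statement) =====
-- stated objective: alternative
-- what changed: Replaces A's single index loop with mixed counters (and a dead update branch) by a two-phase decomposition: group the list into runs (value, start, length), then scan the runs for the first truthy run whose length-1 strictly beats the best.
import Mathlib
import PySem

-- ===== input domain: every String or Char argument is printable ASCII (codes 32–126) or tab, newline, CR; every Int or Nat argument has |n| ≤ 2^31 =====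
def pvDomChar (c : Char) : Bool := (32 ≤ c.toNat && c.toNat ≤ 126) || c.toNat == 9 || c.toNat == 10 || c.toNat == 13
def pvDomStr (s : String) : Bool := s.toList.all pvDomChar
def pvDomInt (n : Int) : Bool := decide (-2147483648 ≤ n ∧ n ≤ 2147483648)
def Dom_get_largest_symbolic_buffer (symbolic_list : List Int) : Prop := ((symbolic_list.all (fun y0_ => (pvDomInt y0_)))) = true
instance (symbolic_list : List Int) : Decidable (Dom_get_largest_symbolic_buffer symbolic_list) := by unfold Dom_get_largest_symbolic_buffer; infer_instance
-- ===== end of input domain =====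

-- B re-implements A as a two-phase run decomposition (group into runs, then scan the runs); same cost, plainer structure.

-- ===== PORT A =====
-- state = (position, count, greatest_count), one step of A's for-loop body at index i
def pvStepA (symbolic_list : List Int) (st : Int × Int × Int) (i : Int) : Int × Int × Int :=
  let position := st.1; let count := st.2.1; let greatest_count := st.2.2
  if PySem.List.pyGetD symbolic_list i 0 ≠ 0 ∧
     PySem.List.pyGetD symbolic_list i 0 = PySem.List.pyGetD symbolic_list (i - 1) 0 then
    let count := count + 1
    if count > greatest_count then (i - count, count, count)
    else (position, count, greatest_count)
  else
    if count > greatest_count then (i - 1 - count, 0, count)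
    else (position, 0, greatest_count)

def get_largest_symbolic_buffer (symbolic_list : List Int) : Int × Int :=
  let st := (PySem.List.pyRange 1 (symbolic_list.length : Int) 1).foldl (pvStepA symbolic_list) (0, 0, 0)
  (st.1, st.2.2)

-- ===== PORT B =====
-- group the tail into runs (value, start, length), carrying the current run (v, start, len)
def pvRunsAux (v start len : Int) : List Int → List (Int × Int × Int)
  | [] => [(v, start, len)]
  | x :: xs =>
      if x = v then pvRunsAux v start (len + 1) xs
      else (v, start, len) :: pvRunsAux x (start + len) 1 xs

def pvRuns : List Int → List (Int × Int × Int)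
  | [] => []
  | x :: xs => pvRunsAux x 0 1 xs

-- scan step: keep the first truthy run whose length-1 strictly beats the best
def pvStepB (best : Int × Int) (r : Int × Int × Int) : Int × Int :=
  if r.1 ≠ 0 ∧ r.2.2 - 1 > best.2 then (r.2.1, r.2.2 - 1) else best

def get_largest_symbolic_buffer_alt (symbolic_list : List Int) : Int × Int :=
  (pvRuns symbolic_list).foldl pvStepB (0, 0)

-- ===== PRECONDITION & SPEC =====
def Spec_get_largest_symbolic_buffer (symbolic_list : List Int) (out : Int × Int) : Prop := out = get_largest_symbolic_buffer_alt symbolic_list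
instance (symbolic_list : List Int) (out : Int × Int) : Decidable (Spec_get_largest_symbolic_buffer symbolic_list out) := by unfold Spec_get_largest_symbolic_buffer; infer_instance

-- ===== CLAIM (what is proved, stated in full; the proofs are below) =====
def Claim_equal_get_largest_symbolic_buffer : Prop := ∀ (symbolic_list : List Int), Dom_get_largest_symbolic_buffer symbolic_list → Spec_get_largest_symbolic_buffer symbolic_list (get_largest_symbolic_buffer symbolic_list)

-- ===== LEMMAS AND PROOFS =====

-- A's loop body, rephrased on the current element x, the previous element prev and the index i
def pvBody (prev x i : Int) (st : Int × Int × Int) : Int × Int × Int :=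
  if x ≠ 0 ∧ x = prev then
    if st.2.1 + 1 > st.2.2 then (i - (st.2.1 + 1), st.2.1 + 1, st.2.1 + 1)
    else (st.1, st.2.1 + 1, st.2.2)
  else
    if st.2.1 > st.2.2 then (i - 1 - st.2.1, 0, st.2.1)
    else (st.1, 0, st.2.2)

-- structural form of A's loop: prev is the element at index i-1, rest the elements from index i on
def pvLoopA (prev i : Int) (st : Int × Int × Int) : List Int → Int × Int × Int
  | [] => st
  | x :: xs => pvLoopA x (i + 1) (pvBody prev x i st) xs

lemma pvBody_true (prev x i pos cnt gc : Int) (h : x ≠ 0 ∧ x = prev) :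
    pvBody prev x i (pos, cnt, gc)
      = if cnt + 1 > gc then (i - (cnt + 1), cnt + 1, cnt + 1) else (pos, cnt + 1, gc) := by
  unfold pvBody; rw [if_pos h]

lemma pvBody_false (prev x i pos cnt gc : Int) (h : ¬ (x ≠ 0 ∧ x = prev)) :
    pvBody prev x i (pos, cnt, gc)
      = if cnt > gc then (i - 1 - cnt, 0, cnt) else (pos, 0, gc) := by
  unfold pvBody; rw [if_neg h]

-- bridge: A's foldl over range(k+1, len) with indexing equals the structural loop
lemma pv_bridge (l : List Int) : ∀ (rest : List Int) (k : Nat) (st : Int × Int × Int),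
    l.drop (k + 1) = rest → k < l.length →
    (PySem.List.pyRange ((k : Int) + 1) (l.length : Int) 1).foldl (pvStepA l) st
      = pvLoopA (l.getD k 0) ((k : Int) + 1) st rest := by
  intro rest
  induction rest with
  | nil =>
      intro k st hdrop hk
      have hlen : l.length ≤ k + 1 := by
        by_contra h
        have : l.drop (k+1) ≠ [] := by
          simp [List.drop_eq_nil_iff]; omega
        exact this hdrop
      rw [PySem.List.pyRange_one_eq_nil (by exact_mod_cast hlen)]
      simp [pvLoopA]
  | cons x xs ih =>
      intro k st hdrop hk
      have hk1 : k + 1 < l.length := by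
        by_contra h
        have : l.drop (k+1) = [] := by simp [List.drop_eq_nil_iff]; omega
        rw [this] at hdrop; cases hdrop
      have h := List.drop_eq_getElem_cons (l := l) (i := k+1) hk1
      rw [hdrop] at h
      obtain ⟨h1, h2⟩ := List.cons.inj h
      have hx : l.getD (k+1) 0 = x := by
        simp [List.getD, List.getElem?_eq_getElem hk1, h1.symm]
      have hdrop2 : l.drop (k + 2) = xs := by
        simpa using h2.symm
      rw [PySem.List.pyRange_one_cons (by exact_mod_cast hk1)]
      rw [List.foldl_cons]
      have hxi : PySem.List.pyGetD l ((k : Int) + 1) 0 = x := by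
        have hcast : ((k : Int) + 1) = ((k + 1 : Nat) : Int) := by push_cast; ring
        rw [hcast, PySem.List.pyGetD_natCast]; exact hx
      have hstep : pvStepA l st ((k : Int) + 1) = pvBody (l.getD k 0) x ((k : Int) + 1) st := by
        unfold pvStepA pvBody
        rw [show ((k : Int) + 1 - 1) = ((k : Nat) : Int) from by ring]
        rw [hxi, PySem.List.pyGetD_natCast]
      rw [hstep]
      have hih := ih (k + 1) (pvBody (l.getD k 0) x ((k : Int) + 1) st) hdrop2 hk1
      rw [hx] at hih
      push_cast at hih
      show _ = pvLoopA (l.getD k 0) ((k : Int) + 1) st (x :: xs)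
      simp only [pvLoopA]
      exact hih

-- the effect of one finished run (prev, start, len) on the best pair, in A's state shape
lemma pv_emit (prev start len cnt pos0 gc0 : Int) (hg : 0 ≤ gc0) (hc : 0 ≤ cnt)
    (hnz : prev ≠ 0 → len = cnt + 1) (hz : prev = 0 → cnt = 0) :
    pvStepB (pos0, gc0) (prev, start, len)
      = ((if cnt > gc0 then start else pos0), max gc0 cnt) := by
  unfold pvStepB
  by_cases hp : prev = 0
  · have hcnt : cnt = 0 := hz hp
    subst hcnt; subst hp
    rw [if_neg (by rintro ⟨h, _⟩; exact h rfl)]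
    rw [if_neg (show ¬ (0:Int) > gc0 by omega), show max gc0 0 = gc0 by omega]
  · have hlen := hnz hp
    subst hlen
    rw [show cnt + 1 - 1 = cnt by ring]
    by_cases hgt : cnt > gc0
    · rw [if_pos ⟨hp, hgt⟩, if_pos hgt, show max gc0 cnt = cnt by omega]
    · rw [if_neg (by rintro ⟨_, h⟩; exact hgt h), if_neg hgt, show max gc0 cnt = gc0 by omega]

-- main invariant: the structural loop in the canonical state shape equals B's run scan
lemma pv_main : ∀ (rest : List Int) (prev start len cnt pos0 gc0 : Int),
    0 ≤ gc0 → 0 ≤ cnt → 1 ≤ len →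
    (prev ≠ 0 → len = cnt + 1) → (prev = 0 → cnt = 0) →
    (let r := pvLoopA prev (start + len) ((if cnt > gc0 then start else pos0), cnt, max gc0 cnt) rest
     (r.1, r.2.2))
      = (pvRunsAux prev start len rest).foldl pvStepB (pos0, gc0) := by
  intro rest
  induction rest with
  | nil =>
      intro prev start len cnt pos0 gc0 hg hc hl hnz hz
      simp only [pvLoopA, pvRunsAux, List.foldl_cons, List.foldl_nil]
      rw [pv_emit prev start len cnt pos0 gc0 hg hc hnz hz]
  | cons x xs ih =>
      intro prev start len cnt pos0 gc0 hg hc hl hnz hz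
      by_cases hxp : x = prev
      · subst hxp
        by_cases hx0 : x = 0
        · -- zero run continues: A resets (count stays 0), B extends the run
          have hcnt : cnt = 0 := hz hx0
          subst hcnt
          simp only [pvLoopA]
          rw [pvBody_false _ _ _ _ _ _ (by rintro ⟨h, _⟩; exact h hx0)]
          rw [if_neg (show ¬ (0:Int) > max gc0 0 by omega)]
          rw [if_neg (show ¬ (0:Int) > gc0 by omega)]
          have hruns : pvRunsAux x start len (x :: xs) = pvRunsAux x start (len + 1) xs := by
            rw [pvRunsAux, if_pos rfl]
          rw [hruns]
          have := ih x start (len + 1) 0 pos0 gc0 hg le_rfl (by omega)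
            (fun h => absurd hx0 h) (fun _ => rfl)
          rw [if_neg (show ¬ (0:Int) > gc0 by omega), show max gc0 0 = gc0 by omega] at this
          rw [show start + len + 1 = start + (len + 1) by ring,
              show max gc0 0 = gc0 by omega]
          exact this
        · -- truthy run continues
          have hlen := hnz hx0
          simp only [pvLoopA]
          rw [pvBody_true _ _ _ _ _ _ ⟨hx0, rfl⟩]
          have hruns : pvRunsAux x start len (x :: xs) = pvRunsAux x start (len + 1) xs := by
            rw [pvRunsAux, if_pos rfl]
          rw [hruns]
          have := ih x start (len + 1) (cnt + 1) pos0 gc0 hg (by omega) (by omega)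
            (fun _ => by omega) (fun h => absurd h hx0)
          rw [show start + len + 1 = start + (len + 1) by ring]
          by_cases hgt : cnt + 1 > gc0
          · rw [if_pos (show cnt + 1 > max gc0 cnt by omega)]
            rw [show start + len - (cnt + 1) = start by omega]
            rw [if_pos hgt, show max gc0 (cnt + 1) = cnt + 1 by omega] at this
            exact this
          · rw [if_neg (show ¬ cnt + 1 > max gc0 cnt by omega)]
            rw [if_neg hgt, show max gc0 (cnt + 1) = max gc0 cnt by omega] at this
            rw [if_neg (show ¬ cnt > gc0 by omega)]
            exact this
      · -- run boundary: B emits the finished run, A's else branch resets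
        simp only [pvLoopA]
        rw [pvBody_false _ _ _ _ _ _ (by rintro ⟨_, h⟩; exact hxp h)]
        rw [if_neg (show ¬ cnt > max gc0 cnt by omega)]
        have hruns : pvRunsAux prev start len (x :: xs)
            = (prev, start, len) :: pvRunsAux x (start + len) 1 xs := by
          rw [pvRunsAux, if_neg hxp]
        rw [hruns, List.foldl_cons, pv_emit prev start len cnt pos0 gc0 hg hc hnz hz]
        have := ih x (start + len) 1 0 (if cnt > gc0 then start else pos0) (max gc0 cnt)
          (by omega) le_rfl le_rfl (fun _ => rfl) (fun _ => rfl)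
        rw [if_neg (show ¬ (0:Int) > max gc0 cnt by omega),
            show max (max gc0 cnt) 0 = max gc0 cnt by omega] at this
        exact this

-- ===== VERDICT (by name: the statement is the Claim_ definition above) =====
theorem get_largest_symbolic_buffer_spec : Claim_equal_get_largest_symbolic_buffer := by
  unfold Claim_equal_get_largest_symbolic_buffer
  intro l _
  unfold Spec_get_largest_symbolic_buffer
  cases l with
  | nil => decide
  | cons x xs =>
      unfold get_largest_symbolic_buffer get_largest_symbolic_buffer_alt
      have hb := pv_bridge (x :: xs) xs 0 (0, 0, 0) (by simp) (by simp)
      simp only [Nat.cast_zero, zero_add] at hb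
      rw [hb]
      have hm := pv_main xs x 0 1 0 0 0 le_rfl le_rfl le_rfl (fun _ => rfl) (fun _ => rfl)
      rw [if_neg (show ¬ (0:Int) > 0 by omega), show max (0:Int) 0 = 0 by omega,
          zero_add] at hm
      simpa [pvRuns, List.getD] using hm
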